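-- pv_equiv track=rewrite | github.com/CausalAgentProtocol/cap-example | example_cap_server/toy_graph.py | _normalize_candidate_nodes
-- ===== SOURCE A (Python) =====
-- NODE_BASELINES = {
--     "marketing_spend": 10.0,
--     "product_quality": 7.0,
--     "demand": 42.0,
--     "retention": 0.8,
--     "revenue": 100.0,
-- }
--
-- def list_nodes() -> list[str]:
--     return list(NODE_BASELINES.keys())
--
-- def _normalize_candidate_nodes(
--     candidate_nodes: list[str] | None,
-- ) -> tuple[list[str], list[str], list[str]]:
--     selected_nodes = (
--         _dedupe_preserve(list_nodes())
--         if candidate_nodes is None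
--         else _dedupe_preserve([node_id for node_id in candidate_nodes if isinstance(node_id, str)])
--     )
--     missing_nodes = [node_id for node_id in selected_nodes if node_id not in NODE_BASELINES]
--     known_nodes = [node_id for node_id in selected_nodes if node_id in NODE_BASELINES]
--     return selected_nodes, known_nodes, missing_nodes
--
-- def _dedupe_preserve(items: list[str]) -> list[str]:
--     seen: set[str] = set()
--     output: list[str] = []
--     for item in items:
--         if item in seen:
--             continue
--         seen.add(item)
--         output.append(item)
--     return output
-- ===== SOURCE B (Python) =====
-- NODE_BASELINES = {
--     "marketing_spend": 10.0,
--     "product_quality": 7.0,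
--     "demand": 42.0,
--     "retention": 0.8,
--     "revenue": 100.0,
-- }
--
-- def list_nodes() -> list[str]:
--     return list(NODE_BASELINES.keys())
--
-- def _normalize_candidate_nodes(
--     candidate_nodes: list[str] | None,
-- ) -> tuple[list[str], list[str], list[str]]:
--     source = (
--         list_nodes()
--         if candidate_nodes is None
--         else [node_id for node_id in candidate_nodes if isinstance(node_id, str)]
--     )
--     seen: set[str] = set()
--     selected: list[str] = []
--     known: list[str] = []
--     missing: list[str] = []
--     for node_id in source:
--         if node_id in seen:
--             continue
--         seen.add(node_id)
--         selected.append(node_id)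
--         if node_id in NODE_BASELINES:
--             known.append(node_id)
--         else:
--             missing.append(node_id)
--     return selected, known, missing
-- ===== Notes on version B (the rewrite author's own statement) =====
-- stated objective: simpler
-- what changed: Replaces the dedupe helper plus two full filtering passes over the deduped list with a single loop that maintains a seen set and builds selected, known and missing simultaneously.
import Mathlib
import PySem

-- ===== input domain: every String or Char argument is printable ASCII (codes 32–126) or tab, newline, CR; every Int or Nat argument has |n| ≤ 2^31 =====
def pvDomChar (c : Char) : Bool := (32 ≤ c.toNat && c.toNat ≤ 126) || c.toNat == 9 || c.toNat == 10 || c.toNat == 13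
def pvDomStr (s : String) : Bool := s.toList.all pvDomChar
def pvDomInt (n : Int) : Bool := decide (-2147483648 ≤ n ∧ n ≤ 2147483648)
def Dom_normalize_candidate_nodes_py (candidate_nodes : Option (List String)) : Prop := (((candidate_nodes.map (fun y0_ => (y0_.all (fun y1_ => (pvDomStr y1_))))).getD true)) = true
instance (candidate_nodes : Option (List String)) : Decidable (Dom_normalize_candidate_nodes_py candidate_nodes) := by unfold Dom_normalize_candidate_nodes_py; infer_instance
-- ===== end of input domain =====

-- B fuses A's dedupe helper and its two filtering passes into one loop building all three lists; objective: simpler (same asymptotic cost).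

-- ===== PORT A =====
-- NODE_BASELINES keys, in insertion order (only membership in the keys matters here)
def nodeBaselineKeys : List String :=
  ["marketing_spend", "product_quality", "demand", "retention", "revenue"]

-- _dedupe_preserve's for-loop, state (seen, output)
def dedupeGo (seen : PySem.Set String) (output : List String) : List String → List String
  | [] => output
  | item :: rest =>
      if PySem.Set.contains seen item then dedupeGo seen output rest
      else dedupeGo (PySem.Set.add seen item) (output ++ [item]) rest

def dedupe_preserve (items : List String) : List String :=
  dedupeGo PySem.Set.empty [] items

def normalize_candidate_nodes_py (candidate_nodes : Option (List String)) : List String × List String × List String :=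
  let selected_nodes :=
    match candidate_nodes with
    | none => dedupe_preserve nodeBaselineKeys
    -- 'isinstance(node_id, str)' is always true under the type convention (elements are String)
    | some xs => dedupe_preserve (xs.filter (fun _ => true))
  let missing_nodes := selected_nodes.filter (fun n => ¬ nodeBaselineKeys.contains n)
  let known_nodes := selected_nodes.filter (fun n => nodeBaselineKeys.contains n)
  (selected_nodes, known_nodes, missing_nodes)

-- ===== PORT B =====
-- B's single for-loop, state (seen, selected, known, missing)
def altGo (seen : PySem.Set String) (selected known missing : List String) :
    List String → List String × List String × List String
  | [] => (selected, known, missing)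
  | node :: rest =>
      if PySem.Set.contains seen node then altGo seen selected known missing rest
      else if nodeBaselineKeys.contains node then
        altGo (PySem.Set.add seen node) (selected ++ [node]) (known ++ [node]) missing rest
      else
        altGo (PySem.Set.add seen node) (selected ++ [node]) known (missing ++ [node]) rest

def normalize_candidate_nodes_py_alt (candidate_nodes : Option (List String)) : List String × List String × List String :=
  let source :=
    match candidate_nodes with
    | none => nodeBaselineKeys
    -- 'isinstance(node_id, str)' is always true under the type convention (elements are String)
    | some xs => xs.filter (fun _ => true)
  altGo PySem.Set.empty [] [] [] source

-- ===== PRECONDITION & SPEC =====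
def Spec_normalize_candidate_nodes_py (candidate_nodes : Option (List String)) (out : List String × List String × List String) : Prop := out = normalize_candidate_nodes_py_alt candidate_nodes
instance (candidate_nodes : Option (List String)) (out : List String × List String × List String) : Decidable (Spec_normalize_candidate_nodes_py candidate_nodes out) := by unfold Spec_normalize_candidate_nodes_py; infer_instance

-- ===== CLAIM (what is proved, stated in full; the proofs are below) =====
def Claim_equal_normalize_candidate_nodes_py : Prop := ∀ (candidate_nodes : Option (List String)), Dom_normalize_candidate_nodes_py candidate_nodes → Spec_normalize_candidate_nodes_py candidate_nodes (normalize_candidate_nodes_py candidate_nodes)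

-- ===== LEMMAS AND PROOFS =====
-- Loop invariant: B's fused loop equals A's dedupe followed by the two filters,
-- provided the known/missing accumulators are the filters of the selected accumulator.
theorem altGo_eq_dedupe (xs : List String) :
    ∀ (seen : PySem.Set String) (sel : List String),
      altGo seen sel (sel.filter (fun n => decide (n ∈ nodeBaselineKeys)))
        (sel.filter (fun n => !decide (n ∈ nodeBaselineKeys))) xs =
      (dedupeGo seen sel xs,
       (dedupeGo seen sel xs).filter (fun n => decide (n ∈ nodeBaselineKeys)),
       (dedupeGo seen sel xs).filter (fun n => !decide (n ∈ nodeBaselineKeys))) := by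
  induction xs with
  | nil => intro seen sel; simp [altGo, dedupeGo]
  | cons x rest ih =>
      intro seen sel
      by_cases hseen : x ∈ seen
      · simp [altGo, dedupeGo, hseen, ih]
      · by_cases hmem : x ∈ nodeBaselineKeys
        · have := ih (PySem.Set.add seen x) (sel ++ [x])
          simpa [altGo, dedupeGo, hseen, hmem, List.filter_append] using this
        · have := ih (PySem.Set.add seen x) (sel ++ [x])
          simpa [altGo, dedupeGo, hseen, hmem, List.filter_append] using this

-- ===== VERDICT (by name: the statement is the Claim_ definition above) =====
theorem normalize_candidate_nodes_py_spec : Claim_equal_normalize_candidate_nodes_py := by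
  intro candidate_nodes _
  unfold Spec_normalize_candidate_nodes_py normalize_candidate_nodes_py
    normalize_candidate_nodes_py_alt dedupe_preserve
  cases candidate_nodes with
  | none => simpa using (altGo_eq_dedupe nodeBaselineKeys PySem.Set.empty []).symm
  | some xs =>
      simpa using (altGo_eq_dedupe (xs.filter (fun _ => true)) PySem.Set.empty []).symm
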